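-- pv_equiv track=rewrite | github.com/efeslab/thermometer-artifact | plot_access_record.py | count_hit_miss
-- ===== SOURCE A (Python) =====
-- import enum
--
-- class RecordType(enum.Enum):
--     hit = 0
--     miss_only = 1
--     miss_insert = 2
--     evict = 3
--
-- def count_hit_miss(data: list):
--     total_hit = 0
--     total_miss = 0
--     for a in data:
--         num = RecordType(int(a))
--         if num == RecordType.hit:
--             total_hit += 1
--         elif num == RecordType.miss_only or num == RecordType.miss_insert:
--             total_miss += 1
--     return [total_hit, total_miss]
-- ===== SOURCE B (Python) =====
-- import enum
--
-- class RecordType(enum.Enum):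
--     hit = 0
--     miss_only = 1
--     miss_insert = 2
--     evict = 3
--
-- def count_hit_miss(data: list):
--     nums = [RecordType(int(a)) for a in data]
--     return [nums.count(RecordType.hit),
--             nums.count(RecordType.miss_only) + nums.count(RecordType.miss_insert)]
-- ===== Notes on version B (the rewrite author's own statement) =====
-- stated objective: simpler
-- what changed: Replaces the single branching two-accumulator loop with staged passes: convert the data once, then obtain each total with separate list.count scans combined arithmetically.
import Mathlib
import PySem

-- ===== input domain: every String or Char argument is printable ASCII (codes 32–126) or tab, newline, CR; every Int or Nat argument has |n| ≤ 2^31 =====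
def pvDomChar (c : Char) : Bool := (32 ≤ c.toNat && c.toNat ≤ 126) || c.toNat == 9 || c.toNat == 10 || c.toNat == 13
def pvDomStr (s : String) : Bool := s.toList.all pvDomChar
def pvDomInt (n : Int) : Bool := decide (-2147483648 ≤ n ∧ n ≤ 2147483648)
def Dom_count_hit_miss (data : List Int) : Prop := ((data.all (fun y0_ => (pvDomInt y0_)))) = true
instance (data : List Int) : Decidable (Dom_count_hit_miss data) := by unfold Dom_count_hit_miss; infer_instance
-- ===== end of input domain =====

-- B replaces the branching two-accumulator loop with staged passes: convert once,
-- then separate list.count scans combined arithmetically (simpler; same cost).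


-- ===== PORT A =====
-- literal port of A's loop: two accumulators, branch per element
-- (RecordType(int(a)) raises ValueError outside 0..3; those inputs are excluded by Pre_)
def count_hit_miss (data : List Int) : List Int :=
  let r := data.foldl (fun (acc : Int × Int) a =>
    if a = 0 then (acc.1 + 1, acc.2)
    else if a = 1 ∨ a = 2 then (acc.1, acc.2 + 1)
    else acc) ((0 : Int), (0 : Int))
  [r.1, r.2]

-- ===== PORT B =====
-- port of Source B: convert once (RecordType(int(a)) — identity on the codes), then count scans
def count_hit_miss_alt (data : List Int) : List Int :=
  let nums := data.map (fun a => a)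
  [(PySem.List.count nums 0 : Int),
   (PySem.List.count nums 1 : Int) + (PySem.List.count nums 2 : Int)]

-- ===== PRECONDITION & SPEC =====
-- Pre_ excludes exactly the inputs on which A raises ValueError (an element that is no RecordType code)
def Pre_count_hit_miss (data : List Int) : Prop := ∀ x ∈ data, 0 ≤ x ∧ x ≤ 3
instance (data : List Int) : Decidable (Pre_count_hit_miss data) := by unfold Pre_count_hit_miss; infer_instance
def pvWitness_count_hit_miss : List Int := [0, 1, 2, 3, 0]

def Spec_count_hit_miss (data : List Int) (out : List Int) : Prop := out = count_hit_miss_alt data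
instance (data : List Int) (out : List Int) : Decidable (Spec_count_hit_miss data out) := by unfold Spec_count_hit_miss; infer_instance

-- ===== CLAIM (what is proved, stated in full; the proofs are below) =====
def Claim_equal_count_hit_miss : Prop := ∀ (data : List Int), Dom_count_hit_miss data → Pre_count_hit_miss data → Spec_count_hit_miss data (count_hit_miss data)

-- ===== LEMMAS AND PROOFS =====
-- A's loop computes (count of 0s, count of 1s + count of 2s), shifted by the accumulator
lemma countA_foldl (data : List Int) (c : Int × Int) :
    data.foldl (fun (acc : Int × Int) a =>
      if a = 0 then (acc.1 + 1, acc.2)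
      else if a = 1 ∨ a = 2 then (acc.1, acc.2 + 1)
      else acc) c
    = (c.1 + data.count 0, c.2 + data.count 1 + data.count 2) := by
  induction data generalizing c with
  | nil => simp
  | cons a t ih =>
    simp only [List.foldl_cons, ih, List.count_cons]
    by_cases h0 : a = 0
    · subst h0; simp; ring_nf
    · by_cases h1 : a = 1
      · subst h1; simp; ring_nf
      · by_cases h2 : a = 2
        · subst h2; simp; ring_nf
        · simp [h0, h1, h2]

-- ===== VERDICT (by name: the statement is the Claim_ definition above) =====
theorem count_hit_miss_spec : Claim_equal_count_hit_miss := by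
  intro data _ _
  unfold Spec_count_hit_miss count_hit_miss count_hit_miss_alt
  simp only [countA_foldl, PySem.List.count_eq, List.map_id']
  norm_num
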